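-- pv_equiv track=rewrite | github.com/asadmshah/cs61a | week6/lab.py | build_successors_table
-- ===== SOURCE A (Python) =====
-- def build_successors_table(tokens):
-- 	"""
-- 	Returns a dictionary where they keys are for each word's succesor(s) are
-- 	the values.
--
-- 	>>> text = "the cow eats the dog .".split(" ")
-- 	>>> table = build_successors_table(text)
-- 	>>> tst = {'the': ['cow', 'dog'], 'cow': ['eats'], 'eats': ['the'], 'dog': ['.'], '.': ['the']}
-- 	>>> tst == table
-- 	True
-- 	"""
-- 	table = {}
-- 	prev = '.'
-- 	for word in tokens:
-- 		if prev in table: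
-- 			table[prev].append(word)
-- 		else:
-- 			table[prev] = [word]
-- 		prev = word
-- 	return table
-- ===== SOURCE B (Python) =====
-- def build_successors_table(tokens):
--     toks = list(tokens)
--     pairs = list(zip(['.'] + toks[:-1], toks))
--     keys = []
--     for p, _ in pairs:
--         if p not in keys:
--             keys.append(p)
--     return {k: [w for p, w in pairs if p == k] for k in keys}
-- ===== Notes on version B (the rewrite author's own statement) =====
-- stated objective: alternative
-- what changed: B is a two-stage group-by: it first materializes the (predecessor, word) pair list and the distinct predecessors in first-appearance order, then builds each key's successor list by a separate filtering scan of the pair list per key, instead of A's single stateful pass that appends into a growing dict entry by entry.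
import Mathlib
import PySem

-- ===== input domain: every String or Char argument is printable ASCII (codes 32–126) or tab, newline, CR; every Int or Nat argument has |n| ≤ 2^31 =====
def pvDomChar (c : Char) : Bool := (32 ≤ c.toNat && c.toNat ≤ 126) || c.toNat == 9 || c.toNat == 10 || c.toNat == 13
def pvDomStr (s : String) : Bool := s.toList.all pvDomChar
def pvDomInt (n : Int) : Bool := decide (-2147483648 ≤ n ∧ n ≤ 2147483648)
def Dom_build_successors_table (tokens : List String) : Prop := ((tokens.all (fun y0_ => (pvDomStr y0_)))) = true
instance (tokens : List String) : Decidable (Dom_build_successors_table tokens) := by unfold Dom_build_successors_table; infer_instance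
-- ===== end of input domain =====

-- B rebuilds the table as a two-stage group-by (distinct predecessors, then a filtering
-- scan of the pair list per key) instead of A's single stateful dict-appending pass. (alternative)


-- ===== PORT A =====
-- table = {}; prev = '.'; for word: if prev in table: table[prev].append(word) else table[prev] = [word]; prev = word
def build_successors_table (tokens : List String) : List (String × List String) :=
  (tokens.foldl
    (fun (st : PySem.Dict String (List String) × String) word =>
      if st.1.contains st.2 then (st.1.modify st.2 [] (· ++ [word]), word)
      else (st.1.insert st.2 [word], word))
    (PySem.Dict.empty, ".")).1.items

-- ===== PORT B =====
-- pairs = list(zip(['.'] + toks[:-1], toks)); keys = first-appearance distinct predecessors;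
-- {k: [w for p, w in pairs if p == k] for k in keys}
def build_successors_table_alt (tokens : List String) : List (String × List String) :=
  let pairs := ("." :: tokens.dropLast).zip tokens
  let keys := pairs.foldl (fun ks pw => PySem.Set.add ks pw.1) PySem.Set.empty
  keys.map (fun k => (k, (pairs.filter (fun pw => pw.1 == k)).map Prod.snd))

-- ===== PRECONDITION & SPEC =====
def Spec_build_successors_table (tokens : List String) (out : List (String × List String)) : Prop := out = build_successors_table_alt tokens
instance (tokens : List String) (out : List (String × List String)) : Decidable (Spec_build_successors_table tokens out) := by unfold Spec_build_successors_table; infer_instance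

-- ===== CLAIM (what is proved, stated in full; the proofs are below) =====
def Claim_equal_build_successors_table : Prop := ∀ (tokens : List String), Dom_build_successors_table tokens → Spec_build_successors_table tokens (build_successors_table tokens)

-- ===== LEMMAS AND PROOFS =====

-- A's branch is exactly 'modify prev [] (· ++ [word])' whether or not the key is present.
theorem pv_step_eq (d : PySem.Dict String (List String)) (p w : String) :
    (if d.contains p then d.modify p [] (· ++ [w]) else d.insert p [w]) =
      d.modify p [] (· ++ [w]) := by
  by_cases h : d.contains p = true
  · rw [if_pos h]
  · rw [if_neg h, PySem.Dict.modify]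
    simp [PySem.Dict.getD_of_not_contains, h]

-- Zipping the shifted stream peels off exactly the pair (prev, w).
theorem pv_zip_shift (prev w : String) (rest : List String) :
    (prev :: (w :: rest).dropLast).zip (w :: rest) =
      (prev, w) :: ((w :: rest.dropLast).zip rest) := by
  cases rest <;> simp [List.dropLast]

-- A's stateful fold equals the grouping fold over the zipped pairs, for any start.
theorem pv_loop_eq (toks : List String) (prev : String)
    (d : PySem.Dict String (List String)) :
    (toks.foldl
      (fun (st : PySem.Dict String (List String) × String) word =>
        if st.1.contains st.2 then (st.1.modify st.2 [] (· ++ [word]), word)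
        else (st.1.insert st.2 [word], word))
      (d, prev)).1 =
    ((prev :: toks.dropLast).zip toks).foldl
      (fun d pw => d.modify pw.1 [] (· ++ [pw.2])) d := by
  induction toks generalizing prev d with
  | nil => simp
  | cons w rest ih =>
      rw [pv_zip_shift, List.foldl_cons, List.foldl_cons, ← pv_step_eq]
      split_ifs with h <;> exact ih w _

-- ===== VERDICT (by name: the statement is the Claim_ definition above) =====
theorem build_successors_table_spec : Claim_equal_build_successors_table := by
  intro tokens _
  show _ = _
  unfold build_successors_table build_successors_table_alt
  rw [pv_loop_eq]
  set pairs := ("." :: tokens.dropLast).zip tokens with hp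
  have hnd : (pairs.foldl
      (fun d pw => d.modify pw.1 [] (· ++ [pw.2])) PySem.Dict.empty).keys.Nodup :=
    PySem.Dict.nodup_keys_foldl_modify_key pairs Prod.fst []
      (fun d pw => (· ++ [pw.2])) PySem.Dict.empty (by simp)
  rw [PySem.Dict.items_eq_map_keys _ hnd ([] : List String)]
  rw [PySem.Dict.keys_foldl_modify_key]
  simp only [← PySem.Set.update_map_eq_foldl_add, PySem.Dict.keys_empty]
  apply List.map_congr_left
  intro k _
  rw [PySem.Dict.getD_foldl_modify_append, PySem.Dict.getD_empty]
  simp
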